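-- pv_equiv track=rewrite | github.com/JJChiDguez/sibc | sibc/sidh/strategy.py | dynamic_programming_algorithm
-- ===== SOURCE A (Python) =====
-- def dynamic_programming_algorithm(ell, e):
--     """
--     dynamic_programming_algorithm():
--     inputs: the small prime (either 2 or 3) and its exponent
--     output: the optimal strategy and its cost
--     """
--     # My intuition says, e = 1 mod 2 can be improved
--     n = {2:(e//2), 3:e}[ell]
--     p = 12          # Both of x([4]P) and x([3]P) cost 4M + 8S, assuming M=S we have a cost of 12 multiplications
--     q = {2:8, 3:6}[ell]  # cost of a degree-4 and degree-3 isogeny evaluation (6M + 2S + 6a and 4M + 2S + 4a, respectively)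
--
--     S = {1:[]}
--     C = {1:0 }
--     for i in range(2, n+1):
--         b, cost = min(((b, C[i-b] + C[b] + b*p + (i-b)*q) for b in range(1,i)), key=lambda t: t[1])
--         S[i] = [b] + S[i-b] + S[b]
--         C[i] = cost
--
--     return S[n], C[n]
-- ===== SOURCE B (Python) =====
-- def dynamic_programming_algorithm(ell, e):
--     """Cost DP in a flat array plus a parent (split-point) table, with the
--     optimal strategy reconstructed afterwards by a separate recursive pass."""
--     n = {2: e // 2, 3: e}[ell]
--     p = 12
--     q = {2: 8, 3: 6}[ell]
--     C = [0, 0]   # C[i] = minimal cost of an i-leaf strategy (C[0] unused)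
--     P = [0, 0]   # P[i] = smallest optimal split point   (P[0], P[1] unused)
--     for i in range(2, n + 1):
--         best_b, best_cost = 1, C[i - 1] + C[1] + p + (i - 1) * q
--         for b in range(2, i):
--             cost = C[i - b] + C[b] + b * p + (i - b) * q
--             if cost < best_cost:
--                 best_b, best_cost = b, cost
--         C.append(best_cost)
--         P.append(best_b)
--
--     def rec(i):
--         if i == 1:
--             return []
--         b = P[i]
--         return [b] + rec(i - b) + rec(b)
--
--     return rec(n), C[n]
-- ===== Notes on version B (the rewrite author's own statement) =====
-- stated objective: alternative
-- what changed: A fuses strategy lists and costs in dictionaries, rebuilding each intermediate strategy list eagerly; B stores only a flat cost array and a parent (split-point) table with an explicit strict-< argmin scan, and reconstructs the single final strategy by a separate recursive pass, so no intermediate strategy lists are ever built.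
import Mathlib
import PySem

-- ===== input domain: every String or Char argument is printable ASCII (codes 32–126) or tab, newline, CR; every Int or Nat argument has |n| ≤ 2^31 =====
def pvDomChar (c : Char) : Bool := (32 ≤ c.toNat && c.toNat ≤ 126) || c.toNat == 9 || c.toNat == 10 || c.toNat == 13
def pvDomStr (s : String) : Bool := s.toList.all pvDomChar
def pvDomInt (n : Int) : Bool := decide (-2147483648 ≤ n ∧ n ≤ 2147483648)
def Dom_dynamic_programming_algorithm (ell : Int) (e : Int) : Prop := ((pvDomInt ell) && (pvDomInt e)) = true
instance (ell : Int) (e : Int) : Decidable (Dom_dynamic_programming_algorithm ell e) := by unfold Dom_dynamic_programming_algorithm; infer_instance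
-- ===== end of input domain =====

-- B replaces A's fused strategy-and-cost dictionaries by a flat cost array plus a
-- parent (split-point) table and reconstructs the strategy in a separate recursive
-- pass afterwards (objective: alternative decomposition).

-- ===== PORT A =====
-- one loop iteration: i ↦ (S, C) updated; min over the generator of (b, cost) pairs
def pvStepA (q : Int) (st : PySem.Dict Int (List Int) × PySem.Dict Int Int) (i : Int) :
    PySem.Dict Int (List Int) × PySem.Dict Int Int :=
  let S := st.1
  let C := st.2
  let cand := (PySem.List.pyRange 1 i 1).map
    (fun b => (b, C.getD (i - b) 0 + C.getD b 0 + b * 12 + (i - b) * q))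
  -- min(..., key=lambda t: t[1]); the list is nonempty for every i the loop visits,
  -- so the `none` default (1, 0) is unreachable under Pre_
  let bc := (PySem.List.min? cand (fun t => t.2)).getD (1, 0)
  (S.insert i (bc.1 :: (S.getD (i - bc.1) [] ++ S.getD bc.1 [])), C.insert i bc.2)

def pvLoopA (q : Int) (n : Int) : PySem.Dict Int (List Int) × PySem.Dict Int Int :=
  (PySem.List.pyRange 2 (n + 1) 1).foldl (pvStepA q)
    (PySem.Dict.ofList [(1, [])], PySem.Dict.ofList [(1, 0)])

def dynamic_programming_algorithm (ell : Int) (e : Int) : List Int × Int :=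
  -- {2: e//2, 3: e}[ell] and {2: 8, 3: 6}[ell]: any other ell raises KeyError (outside Pre_)
  let n := if ell = 2 then PySem.Int.floordiv e 2 else e
  let q := if ell = 2 then (8 : Int) else 6
  let st := pvLoopA q n
  (st.1.getD n [], st.2.getD n 0)

-- ===== PORT B =====
-- inner argmin scan: explicit accumulator (best_b, best_cost), strict-< update
def pvStepB (q : Int) (st : List Int × List Int) (i : Int) : List Int × List Int :=
  let C := st.1
  let P := st.2
  let init : Int × Int :=
    (1, PySem.List.pyGetD C (i - 1) 0 + PySem.List.pyGetD C 1 0 + 12 + (i - 1) * q)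
  let best := (PySem.List.pyRange 2 i 1).foldl
    (fun bst b =>
      let cost := PySem.List.pyGetD C (i - b) 0 + PySem.List.pyGetD C b 0 + b * 12 + (i - b) * q
      if cost < bst.2 then (b, cost) else bst) init
  (C ++ [best.2], P ++ [best.1])

def pvLoopB (q : Int) (n : Int) : List Int × List Int :=
  (PySem.List.pyRange 2 (n + 1) 1).foldl (pvStepB q) ([0, 0], [0, 0])

-- rec(i) of Source B; Python recurses without fuel, the fuel here only bounds depth
-- (fuel = i.toNat suffices because every split point satisfies 1 ≤ P[i] < i)
def pvRecB (P : List Int) : Nat → Int → List Int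
  | 0, _ => []
  | fuel + 1, i =>
    if i = 1 then []
    else
      let b := PySem.List.pyGetD P i 0
      b :: (pvRecB P fuel (i - b) ++ pvRecB P fuel b)

def dynamic_programming_algorithm_alt (ell : Int) (e : Int) : List Int × Int :=
  let n := if ell = 2 then PySem.Int.floordiv e 2 else e
  let q := if ell = 2 then (8 : Int) else 6
  let st := pvLoopB q n
  (pvRecB st.2 n.toNat n, PySem.List.pyGetD st.1 n 0)

-- ===== PRECONDITION & SPEC =====
-- Pre_ excludes exactly the inputs on which A raises: a KeyError from {2:…,3:…}[ell]
-- when ell ∉ {2,3}, and a KeyError from S[n]/C[n] when n = ({2:e//2,3:e}[ell]) < 1.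
def Pre_dynamic_programming_algorithm (ell : Int) (e : Int) : Prop :=
  (ell = 2 ∧ 2 ≤ e) ∨ (ell = 3 ∧ 1 ≤ e)
instance (ell : Int) (e : Int) : Decidable (Pre_dynamic_programming_algorithm ell e) := by
  unfold Pre_dynamic_programming_algorithm; infer_instance

def pvWitness_dynamic_programming_algorithm : Int × Int := (2, 8)

def Spec_dynamic_programming_algorithm (ell : Int) (e : Int) (out : List Int × Int) : Prop :=
  out = dynamic_programming_algorithm_alt ell e
instance (ell : Int) (e : Int) (out : List Int × Int) :
    Decidable (Spec_dynamic_programming_algorithm ell e out) := by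
  unfold Spec_dynamic_programming_algorithm; infer_instance

-- ===== CLAIM (what is proved, stated in full; the proofs are below) =====
def Claim_equal_dynamic_programming_algorithm : Prop :=
  ∀ (ell : Int) (e : Int), Dom_dynamic_programming_algorithm ell e →
    Pre_dynamic_programming_algorithm ell e →
    Spec_dynamic_programming_algorithm ell e (dynamic_programming_algorithm ell e)

-- ===== LEMMAS AND PROOFS =====

-- Python's min(key=...) on a nonempty list is the strict-< argmin scan
theorem pv_min?_cons {α κ : Type} [LT κ] [DecidableLT κ] (key : α → κ) :
    ∀ (l : List α) (m : α), PySem.List.min? (m :: l) key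
      = some (l.foldl (fun mm x => if key x < key mm then x else mm) m) := by
  intro l
  induction l with
  | nil => intro m; rfl
  | cons x t ih =>
    intro m
    have h1 : PySem.List.min? (m :: x :: t) key
        = PySem.List.min? ((if key x < key m then x else m) :: t) key := by
      simp only [PySem.List.min?, List.foldl_cons]
      by_cases h : key x < key m <;> simp [h]
    rw [h1, ih]
    simp only [List.foldl_cons]

-- A's min over the (b, f b) generator equals B's explicit scan with init b = 1
theorem pv_min_eq_scan (f : Int → Int) (i : Int) (h2 : 2 ≤ i) :
    (PySem.List.min? ((PySem.List.pyRange 1 i 1).map (fun b => (b, f b)))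
        (fun t => t.2)).getD (1, 0)
    = (PySem.List.pyRange 2 i 1).foldl
        (fun bst b => if f b < bst.2 then (b, f b) else bst) (1, f 1) := by
  rw [PySem.List.pyRange_one_cons (by omega : (1 : Int) < i), List.map_cons,
    pv_min?_cons, Option.getD_some, List.foldl_map]
  norm_num

-- the scan's first component is 1 or an element of the scanned list
theorem pv_scan_fst (f : Int → Int) (l : List Int) (init : Int × Int) :
    (l.foldl (fun bst b => if f b < bst.2 then (b, f b) else bst) init).1 = init.1 ∨
    (l.foldl (fun bst b => if f b < bst.2 then (b, f b) else bst) init).1 ∈ l := by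
  induction l generalizing init with
  | nil => left; rfl
  | cons x t ih =>
    simp only [List.foldl_cons]
    rcases ih (if f x < init.2 then (x, f x) else init) with h | h
    · by_cases hx : f x < init.2
      · right; rw [h]; simp [hx]
      · left; rw [h]; simp [hx]
    · right; exact List.mem_cons_of_mem _ h

-- the recursion of Source B is insensitive to the fuel (once ≥ i) and to any change of
-- the table outside the entries 2..j it actually reads, given the split bounds
theorem pv_recB_congr (P Q : List Int) :
    ∀ (fuel : Nat) (j : Int) (fuel' : Nat), 1 ≤ j → j.toNat ≤ fuel → j.toNat ≤ fuel' →
    (∀ k : Int, 2 ≤ k → k ≤ j →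
      1 ≤ PySem.List.pyGetD P k 0 ∧ PySem.List.pyGetD P k 0 < k ∧
      PySem.List.pyGetD P k 0 = PySem.List.pyGetD Q k 0) →
    pvRecB P fuel j = pvRecB Q fuel' j := by
  intro fuel
  induction fuel with
  | zero => intro j _ h1 hf _ _; omega
  | succ f ih =>
    intro j fuel' h1 hf hf' hb
    obtain ⟨f', rfl⟩ : ∃ f', fuel' = f' + 1 := ⟨fuel' - 1, by omega⟩
    by_cases hj : j = 1
    · simp [pvRecB, hj]
    · have h2 : 2 ≤ j := by omega
      obtain ⟨hb1, hb2, hbeq⟩ := hb j h2 le_rfl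
      simp only [pvRecB, if_neg hj]
      rw [← hbeq]
      have hrest : ∀ k : Int, 2 ≤ k → k ≤ j - 1 →
          1 ≤ PySem.List.pyGetD P k 0 ∧ PySem.List.pyGetD P k 0 < k ∧
          PySem.List.pyGetD P k 0 = PySem.List.pyGetD Q k 0 :=
        fun k hk1 hk2 => hb k hk1 (by omega)
      have e1 := ih (j - PySem.List.pyGetD P j 0) f' (by omega) (by omega) (by omega)
        (fun k hk1 hk2 => hrest k hk1 (by omega))
      have e2 := ih (PySem.List.pyGetD P j 0) f' hb1 (by omega) (by omega)
        (fun k hk1 hk2 => hrest k hk1 (by omega))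
      rw [e1, e2]

-- table reads: appended entry / old entries
theorem pv_pyGetD_append_lt (l m : List Int) (j : Int) (h0 : 0 ≤ j)
    (h : j.toNat < l.length) :
    PySem.List.pyGetD (l ++ m) j 0 = PySem.List.pyGetD l j 0 := by
  obtain ⟨k, rfl⟩ : ∃ k : Nat, j = (k : Int) := ⟨j.toNat, by omega⟩
  simp only [PySem.List.pyGetD_natCast]
  rw [List.getD, List.getD, List.getElem?_append_left (by omega)]

theorem pv_pyGetD_append_self (l : List Int) (v : Int) (j : Int)
    (h : j = (l.length : Int)) :
    PySem.List.pyGetD (l ++ [v]) j 0 = v := by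
  subst h
  simp only [PySem.List.pyGetD_natCast]
  rw [List.getD, List.getElem?_append_right (by omega)]
  simp

-- the loop invariant tying A's dictionaries to B's tables
def pvInv (q : Int) (n : Int) : Prop :=
  (pvLoopB q n).1.length = (n + 1).toNat ∧
  (pvLoopB q n).2.length = (n + 1).toNat ∧
  (∀ j : Int, 2 ≤ j → j ≤ n →
    1 ≤ PySem.List.pyGetD (pvLoopB q n).2 j 0 ∧
    PySem.List.pyGetD (pvLoopB q n).2 j 0 < j) ∧
  (∀ j : Int, 1 ≤ j → j ≤ n →
    (pvLoopA q n).2.getD j 0 = PySem.List.pyGetD (pvLoopB q n).1 j 0) ∧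
  (∀ j : Int, 1 ≤ j → j ≤ n → ∀ fuel : Nat, j.toNat ≤ fuel →
    (pvLoopA q n).1.getD j [] = pvRecB (pvLoopB q n).2 fuel j)

theorem pv_loop_succ_A (q n : Int) (h : 1 ≤ n) :
    pvLoopA q (n + 1) = pvStepA q (pvLoopA q n) (n + 1) := by
  unfold pvLoopA
  rw [show n + 1 + 1 = (n + 1) + 1 from rfl,
    PySem.List.pyRange_one_succ_right (by omega : (2 : Int) ≤ n + 1), List.foldl_append]
  rfl

theorem pv_loop_succ_B (q n : Int) (h : 1 ≤ n) :
    pvLoopB q (n + 1) = pvStepB q (pvLoopB q n) (n + 1) := by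
  unfold pvLoopB
  rw [show n + 1 + 1 = (n + 1) + 1 from rfl,
    PySem.List.pyRange_one_succ_right (by omega : (2 : Int) ≤ n + 1), List.foldl_append]
  rfl

theorem pv_loopA_one (q : Int) :
    pvLoopA q 1 = (PySem.Dict.ofList [(1, [])], PySem.Dict.ofList [(1, 0)]) := by
  unfold pvLoopA
  rw [PySem.List.pyRange_one_eq_nil (by norm_num)]
  rfl

theorem pv_loopB_one (q : Int) : pvLoopB q 1 = ([0, 0], [0, 0]) := by
  unfold pvLoopB
  rw [PySem.List.pyRange_one_eq_nil (by norm_num)]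
  rfl

theorem pv_inv (q : Int) : ∀ n : Int, 1 ≤ n → pvInv q n := by
  intro n hn
  induction n, hn using Int.le_induction with
  | base =>
    unfold pvInv
    rw [pv_loopA_one, pv_loopB_one]
    refine ⟨by decide, by decide, fun j hj1 hj2 => by omega, ?_, ?_⟩
    · intro j hj1 hj2
      have : j = 1 := by omega
      subst this; decide
    · intro j hj1 hj2 fuel hfuel
      have hj : j = 1 := by omega
      subst hj
      obtain ⟨f, rfl⟩ : ∃ f, fuel = f + 1 := ⟨fuel - 1, by omega⟩
      simp only [pvRecB, if_true]
      decide
  | succ n hn ih =>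
    obtain ⟨hlenC, hlenP, hP, hC, hS⟩ := ih
    have h2i : (2 : Int) ≤ n + 1 := by omega
    unfold pvInv
    rw [pv_loop_succ_A q n hn, pv_loop_succ_B q n hn]
    set SA := (pvLoopA q n).1 with hSA
    set CA := (pvLoopA q n).2 with hCA
    set CB := (pvLoopB q n).1 with hCB
    set PB := (pvLoopB q n).2 with hPB
    set f : Int → Int :=
      fun b => CA.getD (n + 1 - b) 0 + CA.getD b 0 + b * 12 + (n + 1 - b) * q with hf
    have hfb : ∀ b : Int, 1 ≤ b → b < n + 1 →
        (PySem.List.pyGetD CB (n + 1 - b) 0 + PySem.List.pyGetD CB b 0 + b * 12 +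
          (n + 1 - b) * q) = f b := by
      intro b hb1 hb2
      simp only [hf]
      rw [hC (n + 1 - b) (by omega) (by omega), hC b (by omega) (by omega)]
    set bc := (PySem.List.min? ((PySem.List.pyRange 1 (n + 1) 1).map (fun b => (b, f b)))
        (fun t => t.2)).getD (1, 0) with hbcdef
    have hbc : bc
        = ((PySem.List.pyRange 2 (n + 1) 1).foldl
            (fun bst b =>
              let cost := PySem.List.pyGetD CB (n + 1 - b) 0 + PySem.List.pyGetD CB b 0 +
                b * 12 + (n + 1 - b) * q
              if cost < bst.2 then (b, cost) else bst)
            (1, PySem.List.pyGetD CB (n + 1 - 1) 0 + PySem.List.pyGetD CB 1 0 + 12 +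
              (n + 1 - 1) * q)) := by
      rw [hbcdef, pv_min_eq_scan f (n + 1) h2i]
      have hinit : ((1 : Int), PySem.List.pyGetD CB (n + 1 - 1) 0 +
          PySem.List.pyGetD CB 1 0 + 12 + (n + 1 - 1) * q) = ((1 : Int), f 1) := by
        have h1 := hfb 1 (by omega) (by omega)
        rw [Prod.mk.injEq]
        exact ⟨rfl, by rw [← h1]; ring⟩
      rw [hinit]
      refine (PySem.List.foldl_congr_mem _ _ _ _ ?_).symm
      intro bst b hb
      rw [PySem.List.mem_pyRange_one] at hb
      simp only [hfb b (by omega) (by omega)]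
    have hbc1 : 1 ≤ bc.1 ∧ bc.1 < n + 1 := by
      rw [hbcdef, pv_min_eq_scan f (n + 1) h2i]
      rcases pv_scan_fst f (PySem.List.pyRange 2 (n + 1) 1) (1, f 1) with h | h
      · rw [h]; exact ⟨le_rfl, by omega⟩
      · rw [PySem.List.mem_pyRange_one] at h
        exact ⟨by omega, h.2⟩
    have hstepA : pvStepA q (SA, CA) (n + 1) =
        (SA.insert (n + 1) (bc.1 :: (SA.getD (n + 1 - bc.1) [] ++ SA.getD bc.1 [])),
         CA.insert (n + 1) bc.2) := rfl
    have hstepB : pvStepB q (CB, PB) (n + 1) = (CB ++ [bc.2], PB ++ [bc.1]) := by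
      simp only [pvStepB, ← hbc]
    have hSACA : pvLoopA q n = (SA, CA) := rfl
    have hCBPB : pvLoopB q n = (CB, PB) := rfl
    rw [hSACA, hCBPB, hstepA, hstepB]
    have hlen' : (CB.length : Int) = n + 1 := by rw [hlenC]; omega
    have hlenP' : (PB.length : Int) = n + 1 := by rw [hlenP]; omega
    have hPold : ∀ k : Int, 2 ≤ k → k ≤ n →
        PySem.List.pyGetD (PB ++ [bc.1]) k 0 = PySem.List.pyGetD PB k 0 := by
      intro k hk1 hk2
      exact pv_pyGetD_append_lt PB [bc.1] k (by omega) (by omega)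
    have hPnew : PySem.List.pyGetD (PB ++ [bc.1]) (n + 1) 0 = bc.1 :=
      pv_pyGetD_append_self PB bc.1 (n + 1) (by omega)
    have hPbounds : ∀ k : Int, 2 ≤ k → k ≤ n + 1 →
        1 ≤ PySem.List.pyGetD (PB ++ [bc.1]) k 0 ∧
        PySem.List.pyGetD (PB ++ [bc.1]) k 0 < k := by
      intro k hk1 hk2
      by_cases hki : k = n + 1
      · subst hki; rw [hPnew]; exact hbc1
      · rw [hPold k hk1 (by omega)]; exact hP k hk1 (by omega)
    refine ⟨?_, ?_, hPbounds, ?_, ?_⟩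
    · simp only [List.length_append, List.length_cons, List.length_nil, hlenC]; omega
    · simp only [List.length_append, List.length_cons, List.length_nil, hlenP]; omega

    · -- costs agree
      intro j hj1 hj2
      by_cases hji : j = n + 1
      · subst hji
        rw [PySem.Dict.getD_insert, if_pos rfl,
          pv_pyGetD_append_self CB bc.2 (n + 1) (by omega)]
      · rw [PySem.Dict.getD_insert, if_neg hji,
          pv_pyGetD_append_lt CB [bc.2] j (by omega) (by omega),
          hC j hj1 (by omega)]
    · -- strategies agree
      intro j hj1 hj2 fuel hfuel
      have hcongrP : ∀ k : Int, 2 ≤ k → k ≤ n →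
          1 ≤ PySem.List.pyGetD PB k 0 ∧ PySem.List.pyGetD PB k 0 < k ∧
          PySem.List.pyGetD PB k 0 = PySem.List.pyGetD (PB ++ [bc.1]) k 0 := by
        intro k hk1 hk2
        obtain ⟨a, b⟩ := hP k hk1 hk2
        exact ⟨a, b, (hPold k hk1 hk2).symm⟩
      by_cases hji : j = n + 1
      · subst hji
        obtain ⟨fu, rfl⟩ : ∃ fu, fuel = fu + 1 := ⟨fuel - 1, by omega⟩
        rw [PySem.Dict.getD_insert, if_pos rfl]
        have hjne1 : ¬ (n + 1 = (1 : Int)) := by omega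
        simp only [pvRecB, if_neg hjne1, hPnew]
        congr 1
        congr 1
        · rw [hS (n + 1 - bc.1) (by omega) (by omega) (n + 1 - bc.1).toNat le_rfl]
          exact pv_recB_congr PB (PB ++ [bc.1]) (n + 1 - bc.1).toNat (n + 1 - bc.1) fu
            (by omega) le_rfl (by omega)
            (fun k hk1 hk2 => hcongrP k hk1 (by omega))
        · rw [hS bc.1 (by omega) (by omega) bc.1.toNat le_rfl]
          exact pv_recB_congr PB (PB ++ [bc.1]) bc.1.toNat bc.1 fu
            (by omega) le_rfl (by omega)
            (fun k hk1 hk2 => hcongrP k hk1 (by omega))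
      · rw [PySem.Dict.getD_insert, if_neg hji, hS j hj1 (by omega) fuel hfuel]
        exact pv_recB_congr PB (PB ++ [bc.1]) fuel j fuel (by omega) hfuel hfuel
          (fun k hk1 hk2 => hcongrP k hk1 (by omega))

-- ===== VERDICT (by name: the statement is the Claim_ definition above) =====
theorem pv_main (q n : Int) (hn : 1 ≤ n) :
    ((pvLoopA q n).1.getD n [], (pvLoopA q n).2.getD n 0)
      = (pvRecB (pvLoopB q n).2 n.toNat n, PySem.List.pyGetD (pvLoopB q n).1 n 0) := by
  obtain ⟨_, _, _, hC, hS⟩ := pv_inv q n hn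
  exact Prod.ext (hS n (by omega) le_rfl n.toNat le_rfl) (hC n (by omega) le_rfl)

theorem dynamic_programming_algorithm_spec : Claim_equal_dynamic_programming_algorithm := by
  intro ell e _ hpre
  unfold Spec_dynamic_programming_algorithm
  rcases hpre with ⟨h2, he⟩ | ⟨h3, he⟩
  · subst h2
    have hn : 1 ≤ PySem.Int.floordiv e 2 := by
      unfold PySem.Int.floordiv
      rw [Int.fdiv_eq_ediv, if_pos (Or.inl (by norm_num))]
      omega
    simp only [dynamic_programming_algorithm, dynamic_programming_algorithm_alt, if_true]
    exact pv_main 8 (PySem.Int.floordiv e 2) hn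
  · subst h3
    have hne : ¬ ((3 : Int) = 2) := by omega
    simp only [dynamic_programming_algorithm, dynamic_programming_algorithm_alt, if_neg hne]
    exact pv_main 6 e he
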